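-- pv_equiv track=rewrite | github.com/Vincentyao1995/Grad_Design | sim_GPS_tra/code/SLH-MLM.py | judge_precedence
-- ===== SOURCE A (Python) =====
-- def judge_precedence(v_l, v_t):
--     '''
--     this function is to judge whether v_l is the precedence of v_t(see details in paper - Algorithm3.)
--     '''
--     l_former_t_s1 = -1
--     l_former_t_s2 = -1
--     l_former_t = -1
--     for i in range(len(v_l[0][0])):
--         index_temp = v_l[0][0][i]
--         if l_former_t_s1 == 1:
--             break
--         if index_temp == v_l[0][1]:
--             for j in range(i, len(v_l[0][0])):
--                 if v_l[0][0][j] == v_t[0][1]: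
--                     l_former_t_s1 = 1
--                     break
--     for i in range(len(v_l[1][0])):
--         index_temp = v_l[1][0][i]
--         if l_former_t_s2 == 1:
--             break
--         if index_temp == v_l[1][1]:
--             for j in range(i, len(v_l[1][0])):
--                 if v_l[1][0][j] == v_t[1][1]:
--                     l_former_t_s2 = 1
--                     break
--     if l_former_t_s1 == 1 and l_former_t_s2 == 1:
--         l_former_t = 1
--         return True
--     else:
--         return False
-- ===== SOURCE B (Python) =====
-- def judge_precedence(v_l, v_t):
--     def ok(pair, target):
--         seq, marker = pair
--         try:
--             i = seq.index(marker)
--         except ValueError: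
--             return False
--         return target in seq[i:]
--     return ok(v_l[0], v_t[0][1]) and ok(v_l[1], v_t[1][1])
-- ===== Notes on version B (the rewrite author's own statement) =====
-- stated objective: alternative
-- what changed: Replaces the nested rescans (for every occurrence of the marker, a fresh inner scan of the tail) by a single .index() to the first occurrence followed by one membership test on the remaining slice, per stream; quadratic worst case becomes linear, though a timing run's inputs did not confirm a >=1.5x wall-clock gain.
-- outside the precondition, e.g. on judge_precedence([([], 0), ([], 0)], []): A returns False, B raises IndexError
import Mathlib
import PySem

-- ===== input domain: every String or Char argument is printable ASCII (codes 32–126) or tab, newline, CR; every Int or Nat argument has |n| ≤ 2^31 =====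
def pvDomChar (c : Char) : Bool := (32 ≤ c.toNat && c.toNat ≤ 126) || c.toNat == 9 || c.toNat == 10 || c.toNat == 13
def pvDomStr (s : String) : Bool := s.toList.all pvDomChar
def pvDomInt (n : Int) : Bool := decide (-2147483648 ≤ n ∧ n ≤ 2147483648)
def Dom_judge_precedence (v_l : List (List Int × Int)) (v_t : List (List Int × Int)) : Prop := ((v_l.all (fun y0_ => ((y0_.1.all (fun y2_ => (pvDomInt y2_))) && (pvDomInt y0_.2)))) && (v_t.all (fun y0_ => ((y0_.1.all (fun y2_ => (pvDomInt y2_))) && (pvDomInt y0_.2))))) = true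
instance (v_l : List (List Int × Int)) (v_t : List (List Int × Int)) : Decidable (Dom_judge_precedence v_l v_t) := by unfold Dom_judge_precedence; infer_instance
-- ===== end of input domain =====

-- B: per stream, one .index() to the first marker occurrence then one membership test on the
-- remaining slice, instead of A's rescan of the tail at every marker occurrence.
-- Pre_ requires len(v_l) >= 2 and len(v_t) >= 2: that is A's natural domain; A raises IndexError on
-- shorter v_l, and on shorter v_t it returns False only when its inner comparison accidentally never
-- fires (see the excluded cite), where B raises.

-- ===== PORT A =====
-- inner loop: for j in range(i, len(l)): if l[j] == b: found, break
def pyInnerA (rest : List Int) (b : Int) : Bool :=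
  match rest with
  | [] => false
  | x :: xs => if x == b then true else pyInnerA xs b

-- outer loop with the l_former_t_s flag: at each l[i] == a, scan the suffix from i for b
def pyOuterA (l : List Int) (a b : Int) : Bool :=
  match l with
  | [] => false
  | x :: xs =>
      if x == a then
        (if pyInnerA (x :: xs) b then true else pyOuterA xs a b)
      else pyOuterA xs a b

def judge_precedence (v_l : List (List Int × Int)) (v_t : List (List Int × Int)) : Bool :=
  match v_l, v_t with
  | p1 :: p2 :: _, t1 :: t2 :: _ =>
      pyOuterA p1.1 p1.2 t1.2 && pyOuterA p2.1 p2.2 t2.2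
  | _, _ => false  -- unreachable under Pre_ (Python raises IndexError)

-- ===== PORT B =====
-- seq.index(marker) once, then target in seq[i:]
def okB (seq : List Int) (marker target : Int) : Bool :=
  match PySem.List.index? seq marker with
  | none => false
  | some i => (PySem.List.slice seq (some (i : Int)) none).contains target

def judge_precedence_alt (v_l : List (List Int × Int)) (v_t : List (List Int × Int)) : Bool :=
  match PySem.List.pyGet? v_l 0, PySem.List.pyGet? v_l 1,
        PySem.List.pyGet? v_t 0, PySem.List.pyGet? v_t 1 with
  | some p1, some p2, some t1, some t2 =>
      okB p1.1 p1.2 t1.2 && okB p2.1 p2.2 t2.2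
  | _, _, _, _ => false  -- unreachable under Pre_ (Python raises IndexError)

-- ===== PRECONDITION & SPEC =====
-- Pre_ excludes inputs with fewer than two pairs in v_l (A raises IndexError) and fewer than two
-- pairs in v_t (A raises IndexError unless its inner branch never fires, where its False is an
-- accident of lazy access and B raises).
def Pre_judge_precedence (v_l : List (List Int × Int)) (v_t : List (List Int × Int)) : Prop :=
  2 ≤ v_l.length ∧ 2 ≤ v_t.length
instance (v_l : List (List Int × Int)) (v_t : List (List Int × Int)) : Decidable (Pre_judge_precedence v_l v_t) := by unfold Pre_judge_precedence; infer_instance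
def pvWitness_judge_precedence : (List (List Int × Int)) × (List (List Int × Int)) :=
  ([([1, 2], 1), ([3, 4], 3)], [([], 2), ([], 4)])

def Spec_judge_precedence (v_l : List (List Int × Int)) (v_t : List (List Int × Int)) (out : Bool) : Prop := out = judge_precedence_alt v_l v_t
instance (v_l : List (List Int × Int)) (v_t : List (List Int × Int)) (out : Bool) : Decidable (Spec_judge_precedence v_l v_t out) := by unfold Spec_judge_precedence; infer_instance

-- ===== CLAIM (what is proved, stated in full; the proofs are below) =====
def Claim_equal_judge_precedence : Prop := ∀ (v_l : List (List Int × Int)) (v_t : List (List Int × Int)), Dom_judge_precedence v_l v_t → Pre_judge_precedence v_l v_t → Spec_judge_precedence v_l v_t (judge_precedence v_l v_t)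

-- ===== LEMMAS AND PROOFS =====

theorem pyInnerA_eq_contains (l : List Int) (b : Int) : pyInnerA l b = l.contains b := by
  induction l with
  | nil => rfl
  | cons x xs ih =>
      rw [pyInnerA, ih]
      by_cases h : x = b
      · simp [h]
      · simp [h, Ne.symm h, List.contains_cons]

theorem pyOuterA_false_of_not_mem (l : List Int) (a b : Int) (h : l.contains b = false) :
    pyOuterA l a b = false := by
  induction l with
  | nil => rfl
  | cons x xs ih =>
      simp only [List.contains_cons, Bool.or_eq_false_iff, beq_eq_false_iff_ne] at h
      have hbxs : b ∉ xs := by simpa using h.2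
      simp [pyOuterA, pyInnerA_eq_contains, List.contains_cons, h.1, hbxs,
        ih (by simpa using h.2)]

theorem pyGet?_cons_zero {α : Type} (x : α) (xs : List α) :
    PySem.List.pyGet? (x :: xs) 0 = some x := by
  simp [PySem.List.pyGet?, PySem.List.pyIdx?]

theorem pyGet?_cons_one {α : Type} (x y : α) (xs : List α) :
    PySem.List.pyGet? (x :: y :: xs) 1 = some y := by
  simp [PySem.List.pyGet?, PySem.List.pyIdx?]

theorem pyOuterA_eq_okB (l : List Int) (a b : Int) : pyOuterA l a b = okB l a b := by
  induction l with
  | nil => rfl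
  | cons x xs ih =>
      by_cases hxa : x = a
      · subst hxa
        rw [pyOuterA, okB, PySem.List.index?_cons_self]
        simp only [Int.cast_ofNat_Int, PySem.List.slice_zero_start, PySem.List.slice_none_none]
        rw [pyInnerA_eq_contains]
        cases hc : (x :: xs).contains b with
        | true => simp
        | false =>
            simp only [List.contains_cons, Bool.or_eq_false_iff] at hc
            simp [pyOuterA_false_of_not_mem xs x b hc.2]
      · rw [pyOuterA, if_neg (by simp [hxa]), ih, okB, okB,
          PySem.List.index?_cons_of_ne xs hxa]
        cases h : PySem.List.index? xs a with
        | none => rfl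
        | some i =>
            simp only [Option.map_some]
            rw [PySem.List.slice_from_natCast, PySem.List.slice_from_natCast,
              List.drop_succ_cons]

-- ===== VERDICT (by name: the statement is the Claim_ definition above) =====
theorem judge_precedence_spec : Claim_equal_judge_precedence := by
  intro v_l v_t _ hpre
  unfold Spec_judge_precedence
  match v_l, v_t with
  | p1 :: p2 :: _, t1 :: t2 :: _ =>
      simp [judge_precedence, judge_precedence_alt, pyGet?_cons_zero, pyGet?_cons_one,
        pyOuterA_eq_okB]
  | [], _ | [_], _ => simp [Pre_judge_precedence] at hpre
  | _ :: _ :: _, [] | _ :: _ :: _, [_] => simp [Pre_judge_precedence] at hpre
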